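-- pv_equiv track=rewrite | github.com/incoresemi/uatg | uatg/instruction_constants.py | alternate_zeros
-- ===== SOURCE A (Python) =====
-- def twos(val, bits):
--     """
--         Finds the twos complement of the number
--
--         :param val: input to be complemented
--         :param bits: size of the input
--
--         :type val: str or int
--         :type bits: int
--
--         :result: two's complement version of the input
--
--     """
--     if isinstance(val, str):
--         if '0x' in val:
--             val = int(val, 16)
--         else:
--             val = int(val, 2)
--     if (val & (1 << (bits - 1))) != 0:
--         val = val - (1 << bits)
--     return val
--
-- def alternate_zeros(size, signed=True):
--     coverpoints=[]
--     for s in range(2, size):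
--         t1 =( '' if s%2 == 0 else '0') + ''.join(['10']*int(s/2))
--         if not signed:
--              dataset = int(t1,2)
--         else:
--             dataset = twos(t1,s)
--         coverpoints.append(dataset)
--     return coverpoints
-- ===== SOURCE B (Python) =====
-- def alternate_zeros(size, signed=True):
--     # One pass with an arithmetic recurrence: the unsigned pattern value for an
--     # even width s obeys v(s) = 4*v(s-2) + 2, odd widths repeat the previous value;
--     # no string is ever built or parsed.
--     out = []
--     v = 0
--     pow2 = 4  # 2**s for the current s
--     for s in range(2, size):
--         if s % 2 == 0:
--             v = 4 * v + 2
--         out.append(v - pow2 if signed and s % 2 == 0 else v)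
--         pow2 *= 2
--     return out
-- ===== Notes on version B (the rewrite author's own statement) =====
-- stated objective: faster
-- what changed: Instead of building the '10...10' bit string, reparsing it in base 2 and applying a bitmask two's-complement correction for every width s, B maintains the pattern value across one pass via the recurrence v = 4*v + 2 (even widths) together with a running power of two for the sign correction.
import Mathlib
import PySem

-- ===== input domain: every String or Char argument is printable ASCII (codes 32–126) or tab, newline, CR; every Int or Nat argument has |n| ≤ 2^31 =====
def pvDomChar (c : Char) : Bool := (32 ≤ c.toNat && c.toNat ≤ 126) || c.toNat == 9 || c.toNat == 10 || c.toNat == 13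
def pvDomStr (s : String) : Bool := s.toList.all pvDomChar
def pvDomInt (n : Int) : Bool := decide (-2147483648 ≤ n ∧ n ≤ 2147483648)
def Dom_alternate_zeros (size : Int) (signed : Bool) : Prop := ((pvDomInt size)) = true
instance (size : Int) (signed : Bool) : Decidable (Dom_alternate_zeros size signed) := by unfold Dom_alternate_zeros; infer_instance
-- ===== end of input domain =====

-- B replaces A's per-width string building + base-2 reparse + bitmask two's-complement
-- test with one arithmetic recurrence pass (objective: faster, measured).

-- ===== PORT A =====
-- int(cs, 2) ported by hand as the digit fold; exact for the nonempty '0'/'1'-digit strings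
-- that are the only values reaching it in this program.
def pvBinVal (cs : List Char) : Int :=
  cs.foldl (fun acc c => 2 * acc + (if c = '1' then 1 else 0)) 0

-- twos() for a str argument, as called here (bits = s ≥ 2, so the shifts use (·).toNat exactly).
def pvTwos (val : List Char) (bits : Int) : Int :=
  let v : Int :=
    if PySem.Chars.isIn ['0', 'x'] val then (PySem.Int.ofCharsBase? val 16).getD 0
    else pvBinVal val
  if PySem.Int.band v ((1 : Int) <<< (bits - 1).toNat) ≠ 0 then v - ((1 : Int) <<< bits.toNat)
  else v

def alternate_zeros (size : Int) (signed : Bool) : List Int :=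
  (PySem.List.pyRange 2 size 1).foldl
    (fun coverpoints s =>
      -- int(s/2) = PySem.Int.truncdiv s 2 (s is far below 2^53 on Dom)
      let t1 : List Char :=
        (if PySem.Int.mod s 2 = 0 then ([] : List Char) else ['0']) ++
          PySem.Chars.join [] (PySem.List.pyRepeat [['1', '0']] (PySem.Int.truncdiv s 2))
      let dataset : Int := if !signed then pvBinVal t1 else pvTwos t1 s
      coverpoints ++ [dataset]) []

-- ===== PORT B =====
def alternate_zeros_alt (size : Int) (signed : Bool) : List Int :=
  ((PySem.List.pyRange 2 size 1).foldl
    (fun (st : List Int × Int × Int) s =>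
      let v : Int := if PySem.Int.mod s 2 = 0 then 4 * st.2.1 + 2 else st.2.1
      (st.1 ++ [if signed && (PySem.Int.mod s 2 = 0) then v - st.2.2 else v], v, 2 * st.2.2))
    ([], 0, 4)).1

-- ===== PRECONDITION & SPEC =====
def Spec_alternate_zeros (size : Int) (signed : Bool) (out : List Int) : Prop := out = alternate_zeros_alt size signed
instance (size : Int) (signed : Bool) (out : List Int) : Decidable (Spec_alternate_zeros size signed out) := by unfold Spec_alternate_zeros; infer_instance

-- ===== CLAIM (what is proved, stated in full; the proofs are below) =====
def Claim_equal_alternate_zeros : Prop := ∀ (size : Int) (signed : Bool), Dom_alternate_zeros size signed → Spec_alternate_zeros size signed (alternate_zeros size signed)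

-- ===== LEMMAS AND PROOFS =====

-- p k = value of the k-fold pattern '10…10' read in base 2
def pvP : Nat → Int
  | 0 => 0
  | k + 1 => 4 * pvP k + 2

-- the character list '10' * k
def pvRep : Nat → List Char
  | 0 => []
  | k + 1 => '1' :: '0' :: pvRep k

lemma pvP_nonneg (k : Nat) : 0 ≤ pvP k := by
  induction k with
  | zero => simp [pvP]
  | succ k ih => simp only [pvP]; omega

lemma pvP_eq (k : Nat) : 3 * pvP k + 2 = 2 * 4 ^ k := by
  induction k with
  | zero => simp [pvP]
  | succ k ih => simp only [pvP]; ring_nf; ring_nf at ih; omega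

lemma pvP_lt (k : Nat) : pvP k < 2 ^ (2 * k) := by
  have h := pvP_eq k
  have h4 : (4 : Int) ^ k = 2 ^ (2 * k) := by
    rw [show (4 : Int) = 2 ^ 2 by norm_num, ← pow_mul]
  have hp : (0 : Int) < 2 ^ (2 * k) := by positivity
  omega

lemma pvP_ge (k : Nat) (hk : 1 ≤ k) : 2 ^ (2 * k - 1) ≤ pvP k := by
  have h := pvP_eq k
  have h4 : (4 : Int) ^ k = 2 ^ (2 * k) := by
    rw [show (4 : Int) = 2 ^ 2 by norm_num, ← pow_mul]
  have h2 : (2 : Int) * 2 ^ (2 * k - 1) = 2 ^ (2 * k) := by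
    rw [← pow_succ']
    congr 1
    omega
  have hp : (2 : Int) ≤ 2 ^ (2 * k - 1) := by
    calc (2 : Int) = 2 ^ 1 := by norm_num
    _ ≤ 2 ^ (2 * k - 1) := by
      apply pow_le_pow_right₀ (by norm_num)
      omega
  omega

lemma join_replicate (k : Nat) : PySem.Chars.join [] (List.replicate k ['1', '0']) = pvRep k := by
  induction k with
  | zero => simp [PySem.Chars.join_nil, pvRep]
  | succ k ih =>
    cases k with
    | zero => simp [PySem.Chars.join_singleton, pvRep]
    | succ m =>
      rw [List.replicate_succ, List.replicate_succ, PySem.Chars.join_cons_cons,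
        ← List.replicate_succ, ih]
      simp [pvRep]

lemma binfold_rep (k : Nat) : ∀ acc : Int,
    (pvRep k).foldl (fun acc c => 2 * acc + (if c = '1' then 1 else 0)) acc
      = acc * 4 ^ k + pvP k := by
  induction k with
  | zero => intro acc; simp [pvRep, pvP]
  | succ k ih =>
    intro acc
    have h := pvP_eq k
    simp only [pvRep, List.foldl_cons, if_neg (by decide : ¬ ('0' : Char) = '1')]
    rw [ih]
    simp only [pvP]
    push_cast
    ring_nf
    ring_nf at h
    nlinarith [h]

lemma binval_rep (k : Nat) : pvBinVal (pvRep k) = pvP k := by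
  unfold pvBinVal
  rw [binfold_rep]
  ring

lemma mem_rep (k : Nat) (c : Char) (h : c ∈ pvRep k) : c = '1' ∨ c = '0' := by
  induction k with
  | zero => simp [pvRep] at h
  | succ k ih =>
    simp only [pvRep, List.mem_cons] at h
    rcases h with h | h | h
    · exact Or.inl h
    · exact Or.inr h
    · exact ih h

-- the '0x' substring test in twos() is false on the pattern strings
lemma isIn_rep_false (t1 : List Char) (ht : ∀ c ∈ t1, c = '1' ∨ c = '0') :
    PySem.Chars.isIn ['0', 'x'] t1 = false := by
  rw [PySem.Chars.isIn_eq_false_iff]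
  intro hinf
  have hx : 'x' ∈ t1 := hinf.mem (by simp)
  rcases ht 'x' hx with h | h <;> simp at h

-- the per-width value both programs produce
def pvElem (signed : Bool) (s : Int) : Int :=
  if signed && (PySem.Int.mod s 2 = 0) then pvP (s.toNat / 2) - 2 ^ s.toNat
  else pvP (s.toNat / 2)

lemma band_pow_ne_zero_iff (v : Int) (hv : 0 ≤ v) (m : Nat) :
    (PySem.Int.band v ((1 : Int) <<< m) ≠ 0) ↔ v.toNat.testBit m = true := by
  rw [show (1 : Int) <<< m = 2 ^ m by rw [Int.shiftLeft_eq]; ring]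
  rw [PySem.Int.band_of_nonneg hv (by positivity)]
  rw [show ((2 : Int) ^ m).toNat = 2 ^ m from by
    rw [show (2 : Int) ^ m = ((2 ^ m : Nat) : Int) by push_cast; rfl, Int.toNat_natCast]]
  rw [Nat.and_two_pow]
  cases h : Nat.testBit v.toNat m <;> simp

lemma testBit_of_bounds (v : Nat) (m : Nat) (h1 : 2 ^ m ≤ v) (h2 : v < 2 ^ (m + 1)) :
    v.testBit m = true := by
  rw [Nat.testBit_eq_decide_div_mod_eq]
  have hpos : 0 < 2 ^ m := by positivity
  have hs : 2 ^ (m + 1) = 2 ^ m * 2 := pow_succ 2 m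
  have h1' : 1 ≤ v / 2 ^ m := (Nat.le_div_iff_mul_le hpos).mpr (by omega)
  have h2' : v / 2 ^ m < 2 := (Nat.div_lt_iff_lt_mul hpos).mpr (by omega)
  have hd : v / 2 ^ m = 1 := by omega
  simp [hd]

lemma testBit_of_lt (v : Nat) (m : Nat) (h : v < 2 ^ m) : v.testBit m = false := by
  exact Nat.testBit_lt_two_pow h

-- Int mod 2 on a natural-number cast
lemma mod_two_natCast (n : Nat) : (PySem.Int.mod (n : Int) 2 = 0) ↔ n % 2 = 0 := by
  rw [show (2 : Int) = ((2 : Nat) : Int) from rfl, PySem.Int.mod_natCast]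
  exact ⟨fun h => by exact_mod_cast h, fun h => by exact_mod_cast h⟩

lemma pvElem_of_even (signed : Bool) (n : Nat) (he : n % 2 = 0) :
    pvElem signed (n : Int) = if signed then pvP (n / 2) - 2 ^ n else pvP (n / 2) := by
  unfold pvElem
  rw [Int.toNat_natCast,
    show decide (PySem.Int.mod ((n : Nat) : Int) 2 = 0) = true from
      decide_eq_true ((mod_two_natCast n).mpr he)]
  cases signed <;> simp

lemma pvElem_of_odd (signed : Bool) (n : Nat) (ho : n % 2 = 1) :
    pvElem signed (n : Int) = pvP (n / 2) := by
  unfold pvElem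
  rw [Int.toNat_natCast,
    show decide (PySem.Int.mod ((n : Nat) : Int) 2 = 0) = false from
      decide_eq_false (fun h => by have := (mod_two_natCast n).mp h; omega)]
  cases signed <;> simp

-- the pattern-value bounds, in Nat form for the bit test
lemma pvP_toNat_bounds (k : Nat) (hk : 1 ≤ k) :
    2 ^ (2 * k - 1) ≤ (pvP k).toNat ∧ (pvP k).toNat < 2 ^ (2 * k) := by
  have h0 := pvP_nonneg k
  have hge := pvP_ge k hk
  have hlt := pvP_lt k
  have hc1 : ((2 ^ (2 * k - 1) : Nat) : Int) = (2 : Int) ^ (2 * k - 1) := by push_cast; rfl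
  have hc2 : ((2 ^ (2 * k) : Nat) : Int) = (2 : Int) ^ (2 * k) := by push_cast; rfl
  constructor
  · have h : ((2 ^ (2 * k - 1) : Nat) : Int) ≤ ((pvP k).toNat : Int) := by
      rw [Int.toNat_of_nonneg h0, hc1]; exact hge
    exact_mod_cast h
  · have h : ((pvP k).toNat : Int) < ((2 ^ (2 * k) : Nat) : Int) := by
      rw [Int.toNat_of_nonneg h0, hc2]; exact hlt
    exact_mod_cast h

-- A's loop body computes pvElem for every s ≥ 2
lemma elemA_eq (signed : Bool) (s : Int) (hs : 2 ≤ s) :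
    (let t1 : List Char :=
        (if PySem.Int.mod s 2 = 0 then ([] : List Char) else ['0']) ++
          PySem.Chars.join [] (PySem.List.pyRepeat [['1', '0']] (PySem.Int.truncdiv s 2))
     if !signed then pvBinVal t1 else pvTwos t1 s) = pvElem signed s := by
  obtain ⟨n, rfl⟩ : ∃ n : Nat, s = (n : Int) := ⟨s.toNat, by omega⟩
  have hn : 2 ≤ n := by exact_mod_cast hs
  have htd : PySem.Int.truncdiv (n : Int) 2 = ((n / 2 : Nat) : Int) := by
    simp [PySem.Int.truncdiv, Int.tdiv]
  have hrep : PySem.Chars.join [] (PySem.List.pyRepeat [['1', '0']]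
      (PySem.Int.truncdiv (n : Int) 2)) = pvRep (n / 2) := by
    rw [htd, PySem.List.pyRepeat_singleton, Int.toNat_natCast, join_replicate]
  have hk1 : 1 ≤ n / 2 := by omega
  dsimp only
  rw [hrep]
  by_cases he : n % 2 = 0
  · -- even width: t1 is the bare pattern
    rw [if_pos ((mod_two_natCast n).mpr he)]
    have hval : pvBinVal ([] ++ pvRep (n / 2)) = pvP (n / 2) := by
      rw [List.nil_append, binval_rep]
    rw [pvElem_of_even signed n he]
    cases signed with
    | false => simpa using hval
    | true =>
      simp only [Bool.not_true, Bool.false_eq_true, if_false, if_pos]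
      unfold pvTwos
      rw [isIn_rep_false _ (by intro c hc; exact mem_rep _ c (by simpa using hc))]
      simp only [Bool.false_eq_true, if_false]
      rw [hval]
      obtain ⟨hge, hlt⟩ := pvP_toNat_bounds (n / 2) hk1
      have hm1 : (((n : Nat) : Int) - 1).toNat = n - 1 := by omega
      have hbit : (pvP (n / 2)).toNat.testBit (n - 1) = true := by
        apply testBit_of_bounds
        · rw [show n - 1 = 2 * (n / 2) - 1 by omega]; exact hge
        · rw [show n - 1 + 1 = 2 * (n / 2) by omega]; exact hlt
      have hband : PySem.Int.band (pvP (n / 2)) ((1 : Int) <<< (((n : Nat) : Int) - 1).toNat) ≠ 0 := by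
        rw [hm1, band_pow_ne_zero_iff _ (pvP_nonneg _), hbit]
      rw [if_pos hband]
      rw [Int.toNat_natCast, Int.shiftLeft_eq, one_mul]
  · -- odd width: t1 has a leading '0'
    have ho : n % 2 = 1 := by omega
    rw [if_neg (fun h => he ((mod_two_natCast n).mp h))]
    have hval : pvBinVal (['0'] ++ pvRep (n / 2)) = pvP (n / 2) := by
      simp only [List.cons_append, List.nil_append]
      unfold pvBinVal
      simp only [List.foldl_cons]
      rw [show (2 * (0 : Int) + (if ('0' : Char) = '1' then 1 else 0)) = 0 by decide]
      rw [binfold_rep]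
      ring
    rw [pvElem_of_odd signed n ho]
    cases signed with
    | false => simpa using hval
    | true =>
      simp only [Bool.not_true, Bool.false_eq_true, if_false]
      unfold pvTwos
      rw [isIn_rep_false _ (by
        intro c hc
        simp only [List.cons_append, List.nil_append, List.mem_cons] at hc
        rcases hc with rfl | hc
        · exact Or.inr rfl
        · exact mem_rep _ c hc)]
      simp only [Bool.false_eq_true, if_false]
      rw [hval]
      have hbit : (pvP (n / 2)).toNat.testBit (n - 1) = false := by
        apply testBit_of_lt
        obtain ⟨_, hlt⟩ := pvP_toNat_bounds (n / 2) hk1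
        rw [show n - 1 = 2 * (n / 2) by omega]
        exact hlt
      have hband : ¬ (PySem.Int.band (pvP (n / 2)) ((1 : Int) <<< (((n : Nat) : Int) - 1).toNat) ≠ 0) := by
        rw [show (((n : Nat) : Int) - 1).toNat = n - 1 by omega,
          band_pow_ne_zero_iff _ (pvP_nonneg _), hbit]
        simp
      rw [if_neg hband]

-- B's fold over range(2, 2+n): output, value invariant, power-of-two invariant
lemma Bfold (signed : Bool) (n : Nat) :
    (PySem.List.pyRange 2 (2 + (n : Int)) 1).foldl
      (fun (st : List Int × Int × Int) s =>
        let v : Int := if PySem.Int.mod s 2 = 0 then 4 * st.2.1 + 2 else st.2.1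
        (st.1 ++ [if signed && (PySem.Int.mod s 2 = 0) then v - st.2.2 else v], v, 2 * st.2.2))
      ([], 0, 4)
    = ((PySem.List.pyRange 2 (2 + (n : Int)) 1).map (pvElem signed),
        pvP ((n + 1) / 2), 2 ^ (n + 2)) := by
  induction n with
  | zero =>
    rw [show (2 + ((0 : Nat) : Int)) = 2 by norm_num, PySem.List.pyRange_one_eq_nil (le_refl 2)]
    simp [pvP]
  | succ n ih =>
    have hsplit : PySem.List.pyRange 2 (2 + ((n + 1 : Nat) : Int)) 1
        = PySem.List.pyRange 2 (2 + (n : Int)) 1 ++ [2 + (n : Int)] := by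
      rw [show (2 + ((n + 1 : Nat) : Int)) = (2 + (n : Int)) + 1 by push_cast; ring]
      exact PySem.List.pyRange_one_succ_right (by omega)
    have hcast : (2 + (n : Int)) = ((n + 2 : Nat) : Int) := by push_cast; ring
    rw [hsplit, List.foldl_append, ih, List.map_append, List.foldl_cons, List.foldl_nil]
    have hmod : (PySem.Int.mod (2 + (n : Int)) 2 = 0) ↔ n % 2 = 0 := by
      rw [hcast, mod_two_natCast]; omega
    by_cases he : n % 2 = 0
    · have hvp : (if PySem.Int.mod (2 + (n : Int)) 2 = 0 then 4 * pvP ((n + 1) / 2) + 2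
          else pvP ((n + 1) / 2)) = pvP ((n + 1 + 1) / 2) := by
        rw [if_pos (hmod.mpr he), show (n + 1 + 1) / 2 = (n + 1) / 2 + 1 by omega]
        rfl
      dsimp only
      rw [hvp]
      refine Prod.ext ?_ (Prod.ext rfl ?_)
      · simp only [List.append_cancel_left_eq, List.map_cons, List.map_nil,
          List.cons.injEq, and_true]
        rw [hcast, pvElem_of_even signed (n + 2) (by omega),
          show (n + 2) / 2 = (n + 1 + 1) / 2 from rfl,
          show decide (PySem.Int.mod ((n + 2 : Nat) : Int) 2 = 0) = true from
            decide_eq_true ((mod_two_natCast (n + 2)).mpr (by omega))]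
        cases signed <;> simp
      · show 2 * 2 ^ (n + 2) = 2 ^ (n + 1 + 2)
        ring
    · have hvp : (if PySem.Int.mod (2 + (n : Int)) 2 = 0 then 4 * pvP ((n + 1) / 2) + 2
          else pvP ((n + 1) / 2)) = pvP ((n + 1 + 1) / 2) := by
        rw [if_neg (fun h => he (hmod.mp h)), show (n + 1 + 1) / 2 = (n + 1) / 2 by omega]
      dsimp only
      rw [hvp]
      refine Prod.ext ?_ (Prod.ext rfl ?_)
      · simp only [List.append_cancel_left_eq, List.map_cons, List.map_nil,
          List.cons.injEq, and_true]
        rw [hcast, pvElem_of_odd signed (n + 2) (by omega),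
          show (n + 2) / 2 = (n + 1 + 1) / 2 from rfl,
          show decide (PySem.Int.mod ((n + 2 : Nat) : Int) 2 = 0) = false from
            decide_eq_false (fun h => by have := (mod_two_natCast (n + 2)).mp h; omega)]
        cases signed <;> simp
      · show 2 * 2 ^ (n + 2) = 2 ^ (n + 1 + 2)
        ring

-- ===== VERDICT (by name: the statement is the Claim_ definition above) =====
theorem alternate_zeros_spec : Claim_equal_alternate_zeros := by
  intro size signed _
  unfold Spec_alternate_zeros alternate_zeros alternate_zeros_alt
  by_cases h : size ≤ 2
  · rw [PySem.List.pyRange_one_eq_nil h]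
    rfl
  · obtain ⟨n, rfl⟩ : ∃ n : Nat, size = 2 + (n : Int) := ⟨(size - 2).toNat, by omega⟩
    rw [Bfold]
    refine Eq.trans (PySem.List.foldl_congr_mem _ _
      (fun acc s => acc ++ [pvElem signed s]) _ ?_) ?_
    · intro acc x hx
      exact congrArg (fun d => acc ++ [d])
        (elemA_eq signed x (PySem.List.mem_pyRange_one.mp hx).1)
    · rw [PySem.List.foldl_append_singleton_eq_map, List.nil_append]
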